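-- pv_equiv track=rewrite | github.com/HungTrinhIT/Concordance-1 | backend/concordance/concordance_api/help.py | getListSentence
-- ===== SOURCE A (Python) =====
-- def getListSentence(source):
--     newlist, dicpos = [], {}
--     for item in source:
--         if item[1] in dicpos:
--             newlist[dicpos[item[1]]][1].append(item[3])
--         else:
--             newlist.append([item[1], [item[3]]])
--             dicpos[item[1]] = len(dicpos)
--     for i in range(len(newlist)):
--         newlist[i][1] = " ".join(newlist[i][1])
--     return newlist
-- ===== SOURCE B (Python) =====
-- def getListSentence(source):
--     keys = []
--     for item in source:
--         if item[1] not in keys: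
--             keys.append(item[1])
--     return [[k, " ".join(item[3] for item in source if item[1] == k)]
--             for k in keys]
-- ===== Notes on version B (the rewrite author's own statement) =====
-- stated objective: alternative
-- what changed: B first collects the distinct keys in first-occurrence order, then builds each group's joined string by a separate filtering scan of the source per key - no dict, no position index, no incremental per-group state.
import Mathlib
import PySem

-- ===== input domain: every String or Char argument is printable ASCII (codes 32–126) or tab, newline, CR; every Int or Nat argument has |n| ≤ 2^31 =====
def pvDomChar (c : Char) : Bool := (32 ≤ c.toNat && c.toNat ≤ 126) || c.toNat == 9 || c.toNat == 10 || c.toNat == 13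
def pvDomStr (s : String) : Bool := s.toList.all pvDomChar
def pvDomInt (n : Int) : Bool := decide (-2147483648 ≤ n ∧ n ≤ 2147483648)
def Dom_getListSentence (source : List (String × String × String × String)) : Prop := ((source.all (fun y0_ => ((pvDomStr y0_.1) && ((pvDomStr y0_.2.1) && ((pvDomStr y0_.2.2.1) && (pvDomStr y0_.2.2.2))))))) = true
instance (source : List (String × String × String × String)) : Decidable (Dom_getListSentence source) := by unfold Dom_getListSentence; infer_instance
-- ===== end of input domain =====

-- B collects the distinct keys first, then builds each group by a separate filtering
-- scan of the source per key (objective: alternative). Return-value equivalence only.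

-- ===== PORT A =====
-- first loop body: state is (newlist as pairs (key, word list), dicpos : key -> position)
def getListSentenceStep (acc : List (String × List String) × PySem.Dict String Nat)
    (item : String × String × String × String) :
    List (String × List String) × PySem.Dict String Nat :=
  match acc.2.get? item.2.1 with
  | some p => (acc.1.modify p (fun q => (q.1, q.2 ++ [item.2.2.2])), acc.2)
  | none => (acc.1 ++ [(item.2.1, [item.2.2.2])], acc.2.insert item.2.1 acc.2.size)

def getListSentence (source : List (String × String × String × String)) : List (List String) :=
  let st := source.foldl getListSentenceStep ([], PySem.Dict.empty)
  -- second loop: each position i gets its word list replaced by " ".join(...)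
  st.1.map (fun q => [q.1, PySem.Str.join " " q.2])

-- ===== PORT B =====
-- first loop of Source B: collect distinct keys in first-occurrence order
def pvKeysStep (ks : List String) (item : String × String × String × String) : List String :=
  if ks.contains item.2.1 then ks else ks ++ [item.2.1]

def getListSentence_alt (source : List (String × String × String × String)) : List (List String) :=
  let keys := source.foldl pvKeysStep []
  -- comprehension: per key, filter the source and join the matching item[3]s
  keys.map (fun k =>
    [k, PySem.Str.join " " ((source.filter (fun it => it.2.1 == k)).map (fun it => it.2.2.2))])

-- ===== PRECONDITION & SPEC =====
def Spec_getListSentence (source : List (String × String × String × String)) (out : List (List String)) : Prop := out = getListSentence_alt source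
instance (source : List (String × String × String × String)) (out : List (List String)) : Decidable (Spec_getListSentence source out) := by unfold Spec_getListSentence; infer_instance

-- ===== CLAIM (what is proved, stated in full; the proofs are below) =====
def Claim_equal_getListSentence : Prop := ∀ (source : List (String × String × String × String)), Dom_getListSentence source → Spec_getListSentence source (getListSentence source)

-- ===== LEMMAS AND PROOFS =====

-- group of key k in l (B's inner comprehension)
def pvGrp (l : List (String × String × String × String)) (k : String) : List String :=
  (l.filter (fun it => it.2.1 == k)).map (fun it => it.2.2.2)

theorem pvGrp_snoc (l : List (String × String × String × String))
    (x : String × String × String × String) (k : String) :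
    pvGrp (l ++ [x]) k = pvGrp l k ++ (if x.2.1 = k then [x.2.2.2] else []) := by
  simp only [pvGrp, List.filter_append, List.map_append]
  by_cases h : x.2.1 = k
  · simp [List.filter, h]
  · have hb : (x.2.1 == k) = false := beq_eq_false_iff_ne.mpr h
    simp [List.filter, hb, h]

theorem mem_pvKeys (l : List (String × String × String × String)) (ks : List String) (k : String) :
    k ∈ l.foldl pvKeysStep ks ↔ k ∈ ks ∨ ∃ it ∈ l, it.2.1 = k := by
  induction l generalizing ks with
  | nil => simp
  | cons x l ih =>
    simp only [List.foldl_cons, pvKeysStep]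
    by_cases h : ks.contains x.2.1 = true
    · rw [if_pos h, ih]
      constructor
      · rintro (h1 | ⟨it, hit, rfl⟩)
        · exact Or.inl h1
        · exact Or.inr ⟨it, List.mem_cons_of_mem _ hit, rfl⟩
      · rintro (h1 | ⟨it, hit, rfl⟩)
        · exact Or.inl h1
        · rcases List.mem_cons.mp hit with rfl | hit
          · exact Or.inl (by simpa using h)
          · exact Or.inr ⟨it, hit, rfl⟩
    · rw [if_neg h, ih]
      constructor
      · rintro (h1 | ⟨it, hit, rfl⟩)
        · rcases List.mem_append.mp h1 with h1 | h1
          · exact Or.inl h1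
          · exact Or.inr ⟨x, List.mem_cons_self, (List.mem_singleton.mp h1).symm⟩
        · exact Or.inr ⟨it, List.mem_cons_of_mem _ hit, rfl⟩
      · rintro (h1 | ⟨it, hit, rfl⟩)
        · exact Or.inl (List.mem_append.mpr (Or.inl h1))
        · rcases List.mem_cons.mp hit with rfl | hit
          · exact Or.inl (List.mem_append.mpr (Or.inr (List.mem_singleton.mpr rfl)))
          · exact Or.inr ⟨it, hit, rfl⟩

theorem pvKeys_nodup (l : List (String × String × String × String)) (ks : List String)
    (h : ks.Nodup) : (l.foldl pvKeysStep ks).Nodup := by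
  induction l generalizing ks with
  | nil => exact h
  | cons x l ih =>
    simp only [List.foldl_cons, pvKeysStep]
    by_cases hc : ks.contains x.2.1
    · simp only [hc, if_pos]; exact ih ks h
    · simp only [hc, if_neg, Bool.false_eq_true, not_false_iff]
      refine ih _ ?_
      rw [List.nodup_append]
      exact ⟨h, List.nodup_singleton _, by
        intro a ha b hb
        rw [List.mem_singleton] at hb
        subst hb
        intro hab
        exact absurd (by simpa using hab ▸ ha) (by simpa using hc)⟩

theorem idxOf?_snoc {α : Type} [DecidableEq α] (a k : α) (l : List α) :
    (l ++ [k]).idxOf? a =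
      match l.idxOf? a with
      | some i => some i
      | none => if a = k then some l.length else none := by
  induction l with
  | nil =>
    by_cases h : a = k
    · subst h; simp [List.idxOf?_cons]
    · simp [List.idxOf?_cons, Ne.symm h, h]
  | cons b l ih =>
    by_cases hb : b = a
    · subst hb; simp [List.idxOf?_cons]
    · rw [List.cons_append, List.idxOf?_cons, List.idxOf?_cons]
      simp only [ih]
      cases h : l.idxOf? a <;> simp [hb]

theorem idxOf?_eq_some_elim {α : Type} [DecidableEq α] (l : List α) (a : α) (i : Nat)
    (h : l.idxOf? a = some i) : i < l.length ∧ l[i]? = some a := by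
  have h' : l.findIdx? (fun x => x == a) = some i := by simpa [List.idxOf?] using h
  rw [List.findIdx?_eq_some_iff_findIdx_eq] at h'
  obtain ⟨hlt, hidx⟩ := h'
  subst hidx
  refine ⟨hlt, ?_⟩
  rw [List.getElem?_eq_getElem hlt]
  have := List.findIdx_getElem (p := fun x => x == a) (xs := l) (w := hlt)
  simpa using this

-- characterization of A's first loop: newlist holds the first-occurrence keys with their
-- grouped words, and dicpos is the position index of that key list
theorem foldlA_char (l : List (String × String × String × String)) :
    (l.foldl getListSentenceStep ([], PySem.Dict.empty)).1
        = (l.foldl pvKeysStep []).map (fun k => (k, pvGrp l k))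
      ∧ (∀ k, (l.foldl getListSentenceStep ([], PySem.Dict.empty)).2.get? k
          = (l.foldl pvKeysStep []).idxOf? k)
      ∧ (l.foldl getListSentenceStep ([], PySem.Dict.empty)).2.size
          = (l.foldl pvKeysStep []).length := by
  induction l using List.reverseRecOn with
  | nil =>
    refine ⟨rfl, ?_, ?_⟩
    · intro k; simp [PySem.Dict.get?_empty, List.idxOf?]
    · simp [PySem.Dict.size_empty]
  | append_singleton l x ih =>
    obtain ⟨h1, h2, h3⟩ := ih
    rw [List.foldl_append, List.foldl_append] at *
    simp only [List.foldl_cons, List.foldl_nil] at *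
    set st := l.foldl getListSentenceStep ([], PySem.Dict.empty) with hst
    set ks := l.foldl pvKeysStep [] with hks
    have hnodup : ks.Nodup := pvKeys_nodup l [] (List.nodup_nil)
    cases hdp : st.2.get? x.2.1 with
    | some p =>
      have h2k := (h2 x.2.1).symm.trans hdp
      obtain ⟨hplen, hget⟩ := idxOf?_eq_some_elim _ _ _ h2k
      have hksp : ks[p] = x.2.1 := by
        rw [List.getElem?_eq_getElem hplen] at hget; simpa using hget
      have hmem : x.2.1 ∈ ks := hksp ▸ List.getElem_mem hplen
      have hcont : ks.contains x.2.1 = true := by simpa using hmem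
      have hkeq : pvKeysStep ks x = ks := by simp [pvKeysStep, hmem]
      rw [show getListSentenceStep st x
            = (st.1.modify p (fun q => (q.1, q.2 ++ [x.2.2.2])), st.2) by
          simp [getListSentenceStep, hdp], hkeq]
      refine ⟨?_, h2, h3⟩
      rw [h1]
      have hplen' : p < (ks.map (fun k => (k, pvGrp l k))).length := by simpa using hplen
      rw [List.modify_eq_set_get _ hplen']
      apply List.ext_getElem
      · simp
      · intro i hi1 hi2
        have hil : i < ks.length := by simpa using hi1
        simp only [List.get_eq_getElem, List.getElem_set, List.getElem_map]
        by_cases hip : i = p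
        · subst hip
          simp only []
          rw [pvGrp_snoc, hksp]
          simp
        · have hne : x.2.1 ≠ ks[i] := by
            intro hcontra
            exact hip ((List.Nodup.getElem_inj_iff hnodup).mp
              (by rw [← hcontra, hksp])).symm
          have hpi : p ≠ i := fun h => hip h.symm
          simp [hpi, pvGrp_snoc, hne]
    | none =>
      have h2k := (h2 x.2.1).symm.trans hdp
      have hnotmem : x.2.1 ∉ ks := List.idxOf?_eq_none_iff.mp h2k
      have hcont : ks.contains x.2.1 = false := by simpa using hnotmem
      have hkeq : pvKeysStep ks x = ks ++ [x.2.1] := by simp [pvKeysStep, hnotmem]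
      have hgrpnil : pvGrp l x.2.1 = [] := by
        rw [pvGrp, List.filter_eq_nil_iff.mpr, List.map_nil]
        intro it hit hbeq
        exact hnotmem ((mem_pvKeys l [] x.2.1).mpr
          (Or.inr ⟨it, hit, by simpa using hbeq⟩))
      rw [show getListSentenceStep st x
            = (st.1 ++ [(x.2.1, [x.2.2.2])], st.2.insert x.2.1 st.2.size) by
          simp [getListSentenceStep, hdp], hkeq]
      refine ⟨?_, ?_, ?_⟩
      · show st.1 ++ [(x.2.1, [x.2.2.2])]
            = List.map (fun k => (k, pvGrp (l ++ [x]) k)) (ks ++ [x.2.1])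
        rw [h1, List.map_append]
        congr 1
        · apply List.map_congr_left
          intro k hk
          have hne : x.2.1 ≠ k := fun h => hnotmem (h ▸ hk)
          simp [pvGrp_snoc, hne]
        · simp [pvGrp_snoc, hgrpnil]
      · intro k
        rw [PySem.Dict.get?_insert, idxOf?_snoc]
        by_cases hk : k = x.2.1
        · subst hk
          rw [List.idxOf?_eq_none_iff.mpr hnotmem]
          simp [h3]
        · rw [h2 k]
          cases h : ks.idxOf? k <;> simp [hk]
      · have hcontd : st.2.contains x.2.1 = false := by
          rw [PySem.Dict.contains_eq_isSome_get?, hdp]; rfl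
        rw [PySem.Dict.size_insert, hcontd]
        simp [h3]

-- ===== VERDICT (by name: the statement is the Claim_ definition above) =====
theorem getListSentence_spec : Claim_equal_getListSentence := by
  intro source _
  show getListSentence source = getListSentence_alt source
  show (source.foldl getListSentenceStep ([], PySem.Dict.empty)).1.map
        (fun q => [q.1, PySem.Str.join " " q.2])
      = (source.foldl pvKeysStep []).map (fun k =>
          [k, PySem.Str.join " "
            ((source.filter (fun it => it.2.1 == k)).map (fun it => it.2.2.2))])
  rw [(foldlA_char source).1, List.map_map]
  rfl
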